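-- pv_equiv track=rewrite | github.com/tenzin3/rdr_rules_generator | src/rules_generator/RDRPOSTagger/SCRDRlearner/SCRDRTreeLearner.py | get_rule_variations
-- ===== SOURCE A (Python) =====
-- def is_empty_pos(pos: str) -> bool:
--     return pos in ["NO_POS", ""]
--
-- def get_rule_variations(
--     index, start_index, end_index, current_rule, wordrules, posrules, object_pos_list
-- ):
--     if start_index == 2 and index == 2 and index == end_index - 1:
--         if not is_empty_pos(object_pos_list[index]):
--             return [
--                 current_rule + wordrules[index] + " and " + posrules[index],
--             ]
--         else:
--             return [current_rule + wordrules[index]]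
--     if index == 2 and index == end_index - 1:
--         if not is_empty_pos(object_pos_list[index]):
--             return [
--                 current_rule + wordrules[index],
--                 current_rule + wordrules[index] + " and " + posrules[index],
--             ]
--         else:
--             return [current_rule + wordrules[index]]
--     if index == end_index - 1:
--         if not is_empty_pos(object_pos_list[index]):
--             return [
--                 current_rule + posrules[index],
--                 current_rule + wordrules[index],
--                 current_rule + wordrules[index] + " and " + posrules[index],
--             ]
--         else:
--             return [current_rule + wordrules[index]]
--
--     pos_rules = []
--     if index != 2:
--         pos_rules = get_rule_variations(
--             index + 1,
--             index,
--             end_index,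
--             current_rule + posrules[index] + " and ",
--             wordrules,
--             posrules,
--             object_pos_list,
--         )
--     word_rules = get_rule_variations(
--         index + 1,
--         index,
--         end_index,
--         current_rule + wordrules[index] + " and ",
--         wordrules,
--         posrules,
--         object_pos_list,
--     )
--
--     word_and_pos_rules = []
--     if not is_empty_pos(object_pos_list[index]):
--         word_and_pos_rules = get_rule_variations(
--             index + 1,
--             index,
--             end_index,
--             current_rule + wordrules[index] + " and " + posrules[index] + " and ",
--             wordrules,
--             posrules,
--             object_pos_list,
--         )
--     return pos_rules + word_rules + word_and_pos_rules
-- ===== SOURCE B (Python) =====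
-- def get_rule_variations(
--     index, start_index, end_index, current_rule, wordrules, posrules, object_pos_list
-- ):
--     last = end_index - 1
--     if index == last:
--         w = wordrules[index]
--         if object_pos_list[index] in ("NO_POS", ""):
--             base = [w]
--         elif start_index == 2 and index == 2:
--             base = [w + " and " + posrules[index]]
--         elif index == 2:
--             base = [w, w + " and " + posrules[index]]
--         else:
--             p = posrules[index]
--             base = [p, w, w + " and " + p]
--         return [current_rule + s for s in base]
--     # bottom-up: suffix variations for positions i..last, built from last backwards
--     w = wordrules[last]
--     if object_pos_list[last] in ("NO_POS", ""):
--         suf = [w]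
--     elif last == 2:
--         suf = [w, w + " and " + posrules[last]]
--     else:
--         p = posrules[last]
--         suf = [p, w, w + " and " + p]
--     for i in reversed(range(index, last)):
--         w = wordrules[i]
--         nxt = []
--         if i != 2:
--             nxt += [posrules[i] + " and " + s for s in suf]
--         nxt += [w + " and " + s for s in suf]
--         if object_pos_list[i] not in ("NO_POS", ""):
--             nxt += [w + " and " + posrules[i] + " and " + s for s in suf]
--         suf = nxt
--     return [current_rule + s for s in suf]
-- ===== Notes on version B (the rewrite author's own statement) =====
-- stated objective: alternative
-- what changed: Replaces A's three-way branching recursion by a single bottom-up pass: the suffix variations are built once from the last position backwards with a reversed-range loop, and current_rule is prepended only at the end.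
import Mathlib
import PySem

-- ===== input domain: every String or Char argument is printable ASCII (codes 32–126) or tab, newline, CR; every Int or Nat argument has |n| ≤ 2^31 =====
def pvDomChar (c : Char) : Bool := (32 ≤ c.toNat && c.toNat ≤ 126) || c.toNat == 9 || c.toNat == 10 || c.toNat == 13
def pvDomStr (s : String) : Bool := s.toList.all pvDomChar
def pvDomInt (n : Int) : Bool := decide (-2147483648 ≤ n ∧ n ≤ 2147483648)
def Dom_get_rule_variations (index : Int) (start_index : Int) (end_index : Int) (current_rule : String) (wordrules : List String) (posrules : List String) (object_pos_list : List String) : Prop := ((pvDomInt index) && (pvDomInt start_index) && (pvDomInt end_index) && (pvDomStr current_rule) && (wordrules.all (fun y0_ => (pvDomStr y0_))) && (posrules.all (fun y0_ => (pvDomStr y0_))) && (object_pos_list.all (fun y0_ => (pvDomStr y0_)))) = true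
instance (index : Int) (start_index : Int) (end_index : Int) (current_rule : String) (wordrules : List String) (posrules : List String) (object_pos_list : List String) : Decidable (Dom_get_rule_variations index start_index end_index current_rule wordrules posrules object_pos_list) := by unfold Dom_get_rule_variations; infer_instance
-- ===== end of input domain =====

-- B replaces A's three-way recursion by a single bottom-up pass that builds the suffix
-- variations once from the last position backwards and prepends current_rule at the end
-- (objective: alternative decomposition; same behaviour on Pre_).

-- ===== PORT A =====
-- shared indexing helper: Python xs[i] (negative from the end); Pre_ keeps every access in range,
-- so the "" default of getD is never returned inside Pre_.
def pyStrAt (xs : List String) (i : Int) : String := (PySem.List.pyGet? xs i).getD ""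

def is_empty_pos (pos : String) : Bool := pos == "NO_POS" || pos == ""

-- literal transliteration of A's recursion; fuel = end_index - index (the recursion depth Python
-- performs when it returns; outside Pre_ Python recurses forever, the port returns [] at fuel 0)
def getRuleVarsA (fuel : Nat) (index : Int) (start_index : Int) (end_index : Int) (current_rule : String) (wordrules : List String) (posrules : List String) (object_pos_list : List String) : List String :=
  match fuel with
  | 0 => []
  | fuel + 1 =>
    if start_index = 2 ∧ index = 2 ∧ index = end_index - 1 then
      if !is_empty_pos (pyStrAt object_pos_list index) then
        [current_rule ++ pyStrAt wordrules index ++ " and " ++ pyStrAt posrules index]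
      else [current_rule ++ pyStrAt wordrules index]
    else if index = 2 ∧ index = end_index - 1 then
      if !is_empty_pos (pyStrAt object_pos_list index) then
        [current_rule ++ pyStrAt wordrules index,
         current_rule ++ pyStrAt wordrules index ++ " and " ++ pyStrAt posrules index]
      else [current_rule ++ pyStrAt wordrules index]
    else if index = end_index - 1 then
      if !is_empty_pos (pyStrAt object_pos_list index) then
        [current_rule ++ pyStrAt posrules index,
         current_rule ++ pyStrAt wordrules index,
         current_rule ++ pyStrAt wordrules index ++ " and " ++ pyStrAt posrules index]
      else [current_rule ++ pyStrAt wordrules index]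
    else
      (if index ≠ 2 then
        getRuleVarsA fuel (index + 1) index end_index (current_rule ++ pyStrAt posrules index ++ " and ") wordrules posrules object_pos_list
       else []) ++
      getRuleVarsA fuel (index + 1) index end_index (current_rule ++ pyStrAt wordrules index ++ " and ") wordrules posrules object_pos_list ++
      (if !is_empty_pos (pyStrAt object_pos_list index) then
        getRuleVarsA fuel (index + 1) index end_index (current_rule ++ pyStrAt wordrules index ++ " and " ++ pyStrAt posrules index ++ " and ") wordrules posrules object_pos_list
       else [])

def get_rule_variations (index : Int) (start_index : Int) (end_index : Int) (current_rule : String) (wordrules : List String) (posrules : List String) (object_pos_list : List String) : List String :=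
  getRuleVarsA (end_index - index).toNat index start_index end_index current_rule wordrules posrules object_pos_list

-- ===== PORT B =====
-- one backward step of Source B's loop body: suffix variations for position i from those for i+1..last
def pvStepB (wordrules : List String) (posrules : List String) (object_pos_list : List String) (i : Int) (suf : List String) : List String :=
  (if i ≠ 2 then suf.map (fun s => pyStrAt posrules i ++ " and " ++ s) else []) ++
  suf.map (fun s => pyStrAt wordrules i ++ " and " ++ s) ++
  (if ¬(pyStrAt object_pos_list i = "NO_POS" ∨ pyStrAt object_pos_list i = "") then
      suf.map (fun s => pyStrAt wordrules i ++ " and " ++ pyStrAt posrules i ++ " and " ++ s)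
   else [])

def get_rule_variations_alt (index : Int) (start_index : Int) (end_index : Int) (current_rule : String) (wordrules : List String) (posrules : List String) (object_pos_list : List String) : List String :=
  let last := end_index - 1
  if index = last then
    let w := pyStrAt wordrules index
    let base :=
      if pyStrAt object_pos_list index = "NO_POS" ∨ pyStrAt object_pos_list index = "" then [w]
      else if start_index = 2 ∧ index = 2 then [w ++ " and " ++ pyStrAt posrules index]
      else if index = 2 then [w, w ++ " and " ++ pyStrAt posrules index]
      else (let p := pyStrAt posrules index; [p, w, w ++ " and " ++ p])
    base.map (fun s => current_rule ++ s)
  else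
    let w := pyStrAt wordrules last
    let base :=
      if pyStrAt object_pos_list last = "NO_POS" ∨ pyStrAt object_pos_list last = "" then [w]
      else if last = 2 then [w, w ++ " and " ++ pyStrAt posrules last]
      else (let p := pyStrAt posrules last; [p, w, w ++ " and " ++ p])
    -- 'for i in reversed(range(index, last)): suf = step(i, suf)' = foldr over range(index, last)
    let suf := (PySem.List.pyRange index last 1).foldr (pvStepB wordrules posrules object_pos_list) base
    suf.map (fun s => current_rule ++ s)

-- ===== PRECONDITION & SPEC =====
-- Pre_ = exactly the inputs on which Python A returns: the recursion reaches end_index - 1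
-- (index < end_index; otherwise A recurses forever and dies with RecursionError) and every
-- access A performs is a valid Python index (possibly negative): wordrules and object_pos_list
-- at every visited position (equivalently -len ≤ index and end_index ≤ len), posrules only where
-- A actually reads it (non-base non-2 positions, and positions whose POS tag is neither
-- "NO_POS" nor "") -- otherwise IndexError.
def Pre_get_rule_variations (index : Int) (start_index : Int) (end_index : Int) (current_rule : String) (wordrules : List String) (posrules : List String) (object_pos_list : List String) : Prop :=
  index < end_index ∧
  (-(wordrules.length : Int) ≤ index ∧ end_index ≤ (wordrules.length : Int)) ∧
  (-(object_pos_list.length : Int) ≤ index ∧ end_index ≤ (object_pos_list.length : Int)) ∧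
  ∀ j ∈ PySem.List.pyRange index end_index 1,
    ((j ≠ end_index - 1 ∧ j ≠ 2) ∨ ¬(pyStrAt object_pos_list j = "NO_POS" ∨ pyStrAt object_pos_list j = "")) →
      PySem.Raise.InRange posrules.length j
instance (index : Int) (start_index : Int) (end_index : Int) (current_rule : String) (wordrules : List String) (posrules : List String) (object_pos_list : List String) : Decidable (Pre_get_rule_variations index start_index end_index current_rule wordrules posrules object_pos_list) := by unfold Pre_get_rule_variations; infer_instance

def pvWitness_get_rule_variations : Int × Int × Int × String × List String × List String × List String :=
  (0, 0, 2, "", ["w0", "w1"], ["p0", "p1"], ["NN", "VB"])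

def Spec_get_rule_variations (index : Int) (start_index : Int) (end_index : Int) (current_rule : String) (wordrules : List String) (posrules : List String) (object_pos_list : List String) (out : List String) : Prop := out = get_rule_variations_alt index start_index end_index current_rule wordrules posrules object_pos_list
instance (index : Int) (start_index : Int) (end_index : Int) (current_rule : String) (wordrules : List String) (posrules : List String) (object_pos_list : List String) (out : List String) : Decidable (Spec_get_rule_variations index start_index end_index current_rule wordrules posrules object_pos_list out) := by unfold Spec_get_rule_variations; infer_instance

-- ===== CLAIM (what is proved, stated in full; the proofs are below) =====
def Claim_equal_get_rule_variations : Prop := ∀ (index : Int) (start_index : Int) (end_index : Int) (current_rule : String) (wordrules : List String) (posrules : List String) (object_pos_list : List String), Dom_get_rule_variations index start_index end_index current_rule wordrules posrules object_pos_list → Pre_get_rule_variations index start_index end_index current_rule wordrules posrules object_pos_list → Spec_get_rule_variations index start_index end_index current_rule wordrules posrules object_pos_list (get_rule_variations index start_index end_index current_rule wordrules posrules object_pos_list)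

-- ===== LEMMAS AND PROOFS =====

-- suffix variations for positions i..i+n, as B's loop produces them (proof-only helper)
def pvBaseAt (wordrules : List String) (posrules : List String) (object_pos_list : List String) (i : Int) : List String :=
  if pyStrAt object_pos_list i = "NO_POS" ∨ pyStrAt object_pos_list i = "" then [pyStrAt wordrules i]
  else if i = 2 then [pyStrAt wordrules i, pyStrAt wordrules i ++ " and " ++ pyStrAt posrules i]
  else [pyStrAt posrules i, pyStrAt wordrules i, pyStrAt wordrules i ++ " and " ++ pyStrAt posrules i]

def pvS (wordrules : List String) (posrules : List String) (object_pos_list : List String) : Nat → Int → List String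
  | 0, i => pvBaseAt wordrules posrules object_pos_list i
  | n + 1, i => pvStepB wordrules posrules object_pos_list i (pvS wordrules posrules object_pos_list n (i + 1))

-- A's recursion computes current_rule-prefixed pvS, provided the top special case doesn't fire
-- one-step unfolding of A's recursion at positive fuel (proof-only; holds by rfl)
theorem getRuleVarsA_succ (fuel : Nat) (index start_index end_index : Int) (current_rule : String) (wordrules posrules object_pos_list : List String) :
    getRuleVarsA (fuel + 1) index start_index end_index current_rule wordrules posrules object_pos_list =
    (if start_index = 2 ∧ index = 2 ∧ index = end_index - 1 then
      if !is_empty_pos (pyStrAt object_pos_list index) then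
        [current_rule ++ pyStrAt wordrules index ++ " and " ++ pyStrAt posrules index]
      else [current_rule ++ pyStrAt wordrules index]
    else if index = 2 ∧ index = end_index - 1 then
      if !is_empty_pos (pyStrAt object_pos_list index) then
        [current_rule ++ pyStrAt wordrules index,
         current_rule ++ pyStrAt wordrules index ++ " and " ++ pyStrAt posrules index]
      else [current_rule ++ pyStrAt wordrules index]
    else if index = end_index - 1 then
      if !is_empty_pos (pyStrAt object_pos_list index) then
        [current_rule ++ pyStrAt posrules index,
         current_rule ++ pyStrAt wordrules index,
         current_rule ++ pyStrAt wordrules index ++ " and " ++ pyStrAt posrules index]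
      else [current_rule ++ pyStrAt wordrules index]
    else
      (if index ≠ 2 then
        getRuleVarsA fuel (index + 1) index end_index (current_rule ++ pyStrAt posrules index ++ " and ") wordrules posrules object_pos_list
       else []) ++
      getRuleVarsA fuel (index + 1) index end_index (current_rule ++ pyStrAt wordrules index ++ " and ") wordrules posrules object_pos_list ++
      (if !is_empty_pos (pyStrAt object_pos_list index) then
        getRuleVarsA fuel (index + 1) index end_index (current_rule ++ pyStrAt wordrules index ++ " and " ++ pyStrAt posrules index ++ " and ") wordrules posrules object_pos_list
       else [])) := rfl

theorem pvA_eq_S (wordrules posrules object_pos_list : List String) (n : Nat) (i s : Int) (cur : String)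
    (h : n = 0 → ¬(s = 2 ∧ i = 2)) :
    getRuleVarsA (n + 1) i s (i + n + 1) cur wordrules posrules object_pos_list
      = (pvS wordrules posrules object_pos_list n i).map (fun str => cur ++ str) := by
  induction n generalizing i s cur with
  | zero =>
    have hi3 : i + ((0:ℕ):ℤ) + 1 - 1 = i := by push_cast; ring
    simp only [getRuleVarsA, pvS, pvBaseAt, is_empty_pos, hi3]
    have hns : ¬(s = 2 ∧ i = 2 ∧ True) := by simpa using h rfl
    rw [if_neg hns]
    by_cases hi : i = (2:ℤ)
    · subst hi
      rcases em (pyStrAt object_pos_list 2 = "NO_POS" ∨ pyStrAt object_pos_list 2 = "") with he | he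
      · rcases he with he | he <;> simp [he, String.append_assoc]
      · push_neg at he; simp [he.1, he.2, String.append_assoc]
    · rcases em (pyStrAt object_pos_list i = "NO_POS" ∨ pyStrAt object_pos_list i = "") with he | he
      · rcases he with he | he <;> simp [hi, he, String.append_assoc]
      · push_neg at he; simp [hi, he.1, he.2, String.append_assoc]
  | succ n ih =>
    have hcast : (((n:ℕ)+1:ℕ):ℤ) = (n:ℤ) + 1 := by push_cast; ring
    rw [getRuleVarsA_succ, hcast]
    have hne : ¬ i = i + ((n:ℤ) + 1) + 1 - 1 := by omega
    rw [if_neg (fun hc => hne hc.2.2), if_neg (fun hc => hne hc.2), if_neg hne]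
    have harg : i + ((n:ℤ) + 1) + 1 = (i + 1) + (n:ℤ) + 1 := by ring
    have hcond : n = 0 → ¬(i = 2 ∧ i + 1 = 2) := fun _ hc => by omega
    rw [harg]
    rw [ih (i + 1) i (cur ++ pyStrAt posrules i ++ " and ") hcond, ih (i + 1) i (cur ++ pyStrAt wordrules i ++ " and ") hcond,
        ih (i + 1) i (cur ++ pyStrAt wordrules i ++ " and " ++ pyStrAt posrules i ++ " and ") hcond]
    by_cases hi : i = (2:ℤ)
    · subst hi
      rcases em (pyStrAt object_pos_list 2 = "NO_POS" ∨ pyStrAt object_pos_list 2 = "") with he | he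
      · rcases he with he | he <;>
          simp [pvS, pvStepB, is_empty_pos, he, List.map_append, List.map_map, Function.comp_def, String.append_assoc]
      · push_neg at he
        simp [pvS, pvStepB, is_empty_pos, he.1, he.2, List.map_append, List.map_map, Function.comp_def, String.append_assoc]
    · rcases em (pyStrAt object_pos_list i = "NO_POS" ∨ pyStrAt object_pos_list i = "") with he | he
      · rcases he with he | he <;>
          simp [pvS, pvStepB, is_empty_pos, hi, he, List.map_append, List.map_map, Function.comp_def, String.append_assoc]
      · push_neg at he
        simp [pvS, pvStepB, is_empty_pos, hi, he.1, he.2, List.map_append, List.map_map, Function.comp_def, String.append_assoc]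

-- B's foldr over range(i, i+n) from the base at i+n computes pvS n i
theorem pvB_fold_eq_S (wordrules posrules object_pos_list : List String) (n : Nat) (i : Int) :
    (PySem.List.pyRange i (i + n) 1).foldr (pvStepB wordrules posrules object_pos_list)
        (pvBaseAt wordrules posrules object_pos_list (i + n))
      = pvS wordrules posrules object_pos_list n i := by
  induction n generalizing i with
  | zero => simp [PySem.List.pyRange_one_eq_nil (by omega : i + ((0:ℕ):ℤ) ≤ i), pvS]
  | succ n ih =>
    rw [PySem.List.pyRange_one_cons (by omega : i < i + ((n:ℕ) + 1 : ℕ))]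
    simp only [List.foldr_cons]
    have harg : i + ((n + 1 : ℕ) : ℤ) = (i + 1) + (n : ℤ) := by push_cast; ring
    rw [harg, ih (i + 1)]
    rfl

-- ===== VERDICT (by name: the statement is the Claim_ definition above) =====
theorem get_rule_variations_spec : Claim_equal_get_rule_variations := by
  intro index start_index end_index current_rule wordrules posrules object_pos_list _ hpre
  unfold Spec_get_rule_variations
  obtain ⟨hlt, _⟩ := hpre
  by_cases hbase : index = end_index - 1
  · -- both compute the base case directly
    unfold get_rule_variations get_rule_variations_alt
    have hfuel : (end_index - index).toNat = 1 := by omega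
    rw [hfuel]
    simp only [getRuleVarsA, is_empty_pos, if_pos hbase]
    by_cases hs : start_index = 2 ∧ index = 2 <;>
      by_cases hi : index = (2:ℤ) <;>
      by_cases he : pyStrAt object_pos_list index = "NO_POS" ∨ pyStrAt object_pos_list index = "" <;>
      simp_all [String.append_assoc, not_or] <;> tauto
  · -- recursive case: both equal current_rule-prefixed pvS
    set n : Nat := (end_index - index - 1).toNat with hn
    have hend : end_index = index + n + 1 := by omega
    have hn0 : n ≠ 0 := by omega
    unfold get_rule_variations get_rule_variations_alt
    have hfuel : (end_index - index).toNat = n + 1 := by omega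
    rw [hfuel, hend]
    rw [pvA_eq_S wordrules posrules object_pos_list n index start_index current_rule
        (fun h0 _ => hn0 h0)]
    have hlast : index + (n:ℤ) + 1 - 1 = index + (n:ℤ) := by ring
    rw [hlast, if_neg (by omega : ¬ index = index + (n:ℤ))]
    congr 1
    rw [← pvB_fold_eq_S wordrules posrules object_pos_list n index]
    rfl
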